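-- pv_equiv track=rewrite | github.com/yu1745/esp-rpc | generator/ts_emitter.py | c_type_to_ts
-- ===== SOURCE A (Python) =====
-- def c_type_to_ts(c_type: str) -> str:
--     """C 类型映射到 TypeScript"""
--     t = c_type.strip()
--     if t in ('int', 'int32', 'int64', 'uint32', 'uint64', 'float', 'double'):
--         return 'number'
--     if t == 'bool':
--         return 'boolean'
--     if t == 'string':
--         return 'string'
--     if t.startswith('OPTIONAL('):
--         inner = t[9:-1].strip()
--         return f'{c_type_to_ts(inner)} | undefined'
--     if t.startswith('LIST('):
--         inner = t[5:-1].strip()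
--         return f'{c_type_to_ts(inner)}[]'
--     if t.startswith('REQUIRED('):
--         inner = t[9:-1].strip()
--         return c_type_to_ts(inner)
--     return t  # 自定义类型如 User, UserResponse
-- ===== SOURCE B (Python) =====
-- def c_type_to_ts(c_type: str) -> str:
--     """C 类型映射到 TypeScript (iterative: peel wrappers onto a stack, map the base, re-apply suffixes)"""
--     t = c_type.strip()
--     stack = []
--     while True:
--         if t.startswith('OPTIONAL('):
--             stack.append('?')
--             t = t[9:-1].strip()
--         elif t.startswith('REQUIRED('):
--             t = t[9:-1].strip()
--         elif t.startswith('LIST('):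
--             stack.append('[]')
--             t = t[5:-1].strip()
--         else:
--             break
--     if t in ('int', 'int32', 'int64', 'uint32', 'uint64', 'float', 'double'):
--         out = 'number'
--     elif t == 'bool':
--         out = 'boolean'
--     elif t == 'string':
--         out = 'string'
--     else:
--         out = t
--     for w in reversed(stack):
--         out = out + ('[]' if w == '[]' else ' | undefined')
--     return out
-- ===== Notes on version B (the rewrite author's own statement) =====
-- stated objective: alternative
-- what changed: A's recursive descent through wrapper types is replaced by a single iterative peel loop that pushes wrapper kinds onto a stack, a flat base-type lookup, and a reverse pass re-applying the array and undefined-union suffixes.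
import Mathlib
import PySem

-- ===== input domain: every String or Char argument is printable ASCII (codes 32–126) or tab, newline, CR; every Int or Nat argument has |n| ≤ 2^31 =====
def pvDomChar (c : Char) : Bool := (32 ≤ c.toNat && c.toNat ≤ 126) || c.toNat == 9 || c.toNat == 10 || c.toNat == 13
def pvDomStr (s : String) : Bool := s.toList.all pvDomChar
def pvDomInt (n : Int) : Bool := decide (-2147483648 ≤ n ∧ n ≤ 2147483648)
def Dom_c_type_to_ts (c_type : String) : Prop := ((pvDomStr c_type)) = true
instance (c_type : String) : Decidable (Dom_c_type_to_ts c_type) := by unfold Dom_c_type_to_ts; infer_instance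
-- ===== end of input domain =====

-- B replaces A's recursion by a single iterative peel (wrapper kinds pushed on a stack,
-- suffixes re-applied in reverse); same values, objective: alternative decomposition.

-- termination helpers (cited by the ports' decreasing_by)
theorem pvStripLen (s : List Char) : (PySem.Chars.strip s).length ≤ s.length := by
  unfold PySem.Chars.strip PySem.Chars.rstrip PySem.Chars.lstrip
  have h1 := List.length_dropWhile_le PySem.Chars.isspace s
  have h2 := List.length_dropWhile_le PySem.Chars.isspace
      (List.dropWhile PySem.Chars.isspace s).reverse
  simp at h2 ⊢
  omega

theorem pvSliceLt (t p : List Char) (a : Int) (hp : p ≠ [])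
    (h : PySem.Chars.startswith t p = true) :
    (PySem.Chars.slice t (some a) (some (-1))).length < t.length := by
  have hpre : p <+: t := (PySem.Chars.startswith_iff t p).mp h
  have hlen : p.length ≤ t.length := hpre.length_le
  have hpos : 0 < t.length := by
    cases p with
    | nil => exact absurd rfl hp
    | cons c cs => simp at hlen; omega
  rw [PySem.Chars.slice_eq_listSlice, PySem.List.length_slice]
  have := PySem.List.clampIdx_neg_one (n := t.length)
  omega

theorem pvInnerLt (t p : List Char) (a : Int) (hp : p ≠ [])
    (h : PySem.Chars.startswith t p = true) :
    (PySem.Chars.strip (PySem.Chars.slice t (some a) (some (-1)))).length < t.length := by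
  have h1 := pvStripLen (PySem.Chars.slice t (some a) (some (-1)))
  have h2 := pvSliceLt t p a hp h
  omega

theorem pvInnerLtStrip (cs p : List Char) (a : Int) (hp : p ≠ [])
    (h : PySem.Chars.startswith (PySem.Chars.strip cs) p = true) :
    (PySem.Chars.strip (PySem.Chars.slice (PySem.Chars.strip cs) (some a) (some (-1)))).length
      < cs.length := by
  have h1 := pvInnerLt (PySem.Chars.strip cs) p a hp h
  have h2 := pvStripLen cs
  omega

-- ===== PORT A =====
def pvBases : List (List Char) :=
  ["int".toList, "int32".toList, "int64".toList, "uint32".toList,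
   "uint64".toList, "float".toList, "double".toList]

-- recursive, exactly A's branch order; works on the code points (PySem.Chars = str ops)
def ctypeGoA (cs : List Char) : List Char :=
  let t := PySem.Chars.strip cs
  if t ∈ pvBases then "number".toList
  else if t = "bool".toList then "boolean".toList
  else if t = "string".toList then "string".toList
  else if h1 : PySem.Chars.startswith t "OPTIONAL(".toList then
    ctypeGoA (PySem.Chars.strip (PySem.Chars.slice t (some 9) (some (-1)))) ++ " | undefined".toList
  else if h2 : PySem.Chars.startswith t "LIST(".toList then
    ctypeGoA (PySem.Chars.strip (PySem.Chars.slice t (some 5) (some (-1)))) ++ "[]".toList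
  else if h3 : PySem.Chars.startswith t "REQUIRED(".toList then
    ctypeGoA (PySem.Chars.strip (PySem.Chars.slice t (some 9) (some (-1))))
  else t
termination_by cs.length
decreasing_by
  · exact pvInnerLtStrip cs "OPTIONAL(".toList 9 (by decide) h1
  · exact pvInnerLtStrip cs "LIST(".toList 5 (by decide) h2
  · exact pvInnerLtStrip cs "REQUIRED(".toList 9 (by decide) h3

def c_type_to_ts (c_type : String) : String :=
  String.ofList (ctypeGoA c_type.toList)

-- ===== PORT B =====
inductive PvWrap | opt | lst
deriving DecidableEq, Repr

-- the while loop: peel wrapper prefixes, pushing the non-identity kinds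
def pvPeel (stack : List PvWrap) (t : List Char) : List PvWrap × List Char :=
  if h1 : PySem.Chars.startswith t "OPTIONAL(".toList then
    pvPeel (stack ++ [PvWrap.opt]) (PySem.Chars.strip (PySem.Chars.slice t (some 9) (some (-1))))
  else if h2 : PySem.Chars.startswith t "REQUIRED(".toList then
    pvPeel stack (PySem.Chars.strip (PySem.Chars.slice t (some 9) (some (-1))))
  else if h3 : PySem.Chars.startswith t "LIST(".toList then
    pvPeel (stack ++ [PvWrap.lst]) (PySem.Chars.strip (PySem.Chars.slice t (some 5) (some (-1))))
  else (stack, t)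
termination_by t.length
decreasing_by
  · exact pvInnerLt t "OPTIONAL(".toList 9 (by decide) h1
  · exact pvInnerLt t "REQUIRED(".toList 9 (by decide) h2
  · exact pvInnerLt t "LIST(".toList 5 (by decide) h3

def pvBaseTs (t : List Char) : List Char :=
  if t ∈ pvBases then "number".toList
  else if t = "bool".toList then "boolean".toList
  else if t = "string".toList then "string".toList
  else t

-- one step of the reversed for-loop over the stack of wrapper kinds
def pvApplyWrap (r : List Char) (w : PvWrap) : List Char :=
  match w with
  | PvWrap.lst => r ++ "[]".toList
  | PvWrap.opt => r ++ " | undefined".toList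

def c_type_to_ts_alt (c_type : String) : String :=
  let r := pvPeel [] (PySem.Chars.strip c_type.toList)
  String.ofList (r.1.reverse.foldl pvApplyWrap (pvBaseTs r.2))

-- ===== PRECONDITION & SPEC =====
def Spec_c_type_to_ts (c_type : String) (out : String) : Prop := out = c_type_to_ts_alt c_type
instance (c_type : String) (out : String) : Decidable (Spec_c_type_to_ts c_type out) := by unfold Spec_c_type_to_ts; infer_instance

-- ===== CLAIM (what is proved, stated in full; the proofs are below) =====
def Claim_equal_c_type_to_ts : Prop := ∀ (c_type : String), Dom_c_type_to_ts c_type → Spec_c_type_to_ts c_type (c_type_to_ts c_type)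

-- ===== LEMMAS AND PROOFS =====

theorem pvSliceLtStrip (cs p : List Char) (a : Int) (hp : p ≠ [])
    (h : PySem.Chars.startswith (PySem.Chars.strip cs) p = true) :
    (PySem.Chars.slice (PySem.Chars.strip cs) (some a) (some (-1))).length < cs.length := by
  have h1 := pvSliceLt (PySem.Chars.strip cs) p a hp h
  have h2 := pvStripLen cs
  omega


theorem pvDropWhileIdem (p : Char → Bool) (l : List Char) :
    List.dropWhile p (List.dropWhile p l) = List.dropWhile p l :=
  List.dropWhile_idempotent p l

theorem pvLstripRstripLstrip (s : List Char) :
    PySem.Chars.lstrip (PySem.Chars.rstrip (PySem.Chars.lstrip s))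
      = PySem.Chars.rstrip (PySem.Chars.lstrip s) := by
  unfold PySem.Chars.lstrip PySem.Chars.rstrip
  set p := PySem.Chars.isspace with hp
  set u := List.dropWhile p s with hu
  -- the rstrip of u is a prefix of u
  have hpre : (List.dropWhile p u.reverse).reverse <+: u := by
    have hsuf : List.dropWhile p u.reverse <:+ u.reverse := List.dropWhile_suffix p
    have h := (List.reverse_prefix).mpr hsuf
    rwa [List.reverse_reverse] at h
  rw [List.dropWhile_eq_self_iff]
  intro hl
  have hlen : (List.dropWhile p u.reverse).reverse.length ≤ u.length := hpre.length_le
  have hu0 : 0 < u.length := by omega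
  have hget := hpre.getElem (i := 0) hl
  rw [hget]
  have : List.dropWhile p u = u := by rw [hu]; exact pvDropWhileIdem p s
  have := (List.dropWhile_eq_self_iff).mp this hu0
  simpa using this

theorem pvRstripIdem (s : List Char) :
    PySem.Chars.rstrip (PySem.Chars.rstrip s) = PySem.Chars.rstrip s := by
  unfold PySem.Chars.rstrip
  rw [List.reverse_reverse, pvDropWhileIdem]

theorem pvStripIdem (s : List Char) :
    PySem.Chars.strip (PySem.Chars.strip s) = PySem.Chars.strip s := by
  show PySem.Chars.rstrip (PySem.Chars.lstrip (PySem.Chars.rstrip (PySem.Chars.lstrip s)))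
      = PySem.Chars.rstrip (PySem.Chars.lstrip s)
  rw [pvLstripRstripLstrip, pvRstripIdem]

theorem ctypeGoA_strip (x : List Char) :
    ctypeGoA (PySem.Chars.strip x) = ctypeGoA x := by
  conv_lhs => rw [ctypeGoA]
  conv_rhs => rw [ctypeGoA]
  rw [pvStripIdem]

-- a base/bool/string name starts with no wrapper prefix
theorem pvBaseNoWrap (t : List Char)
    (h : t ∈ pvBases ∨ t = "bool".toList ∨ t = "string".toList) :
    PySem.Chars.startswith t "OPTIONAL(".toList = false ∧
    PySem.Chars.startswith t "REQUIRED(".toList = false ∧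
    PySem.Chars.startswith t "LIST(".toList = false := by
  simp only [pvBases, List.mem_cons, List.not_mem_nil, or_false] at h
  rcases h with (rfl|rfl|rfl|rfl|rfl|rfl|rfl)|rfl|rfl <;> decide

theorem pvPeelStop (stack : List PvWrap) (t : List Char)
    (h1 : PySem.Chars.startswith t "OPTIONAL(".toList = false)
    (h2 : PySem.Chars.startswith t "REQUIRED(".toList = false)
    (h3 : PySem.Chars.startswith t "LIST(".toList = false) :
    pvPeel stack t = (stack, t) := by
  rw [pvPeel]
  simp at h1 h2 h3
  simp [h1, h2, h3]

theorem pvMain (cs : List Char) (stack : List PvWrap) :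
    (pvPeel stack (PySem.Chars.strip cs)).1.reverse.foldl pvApplyWrap
      (pvBaseTs (pvPeel stack (PySem.Chars.strip cs)).2)
    = stack.reverse.foldl pvApplyWrap (ctypeGoA cs) := by
  rw [ctypeGoA]
  by_cases hb : PySem.Chars.strip cs ∈ pvBases
  · obtain ⟨h1, h2, h3⟩ := pvBaseNoWrap _ (Or.inl hb)
    rw [pvPeelStop _ _ h1 h2 h3]
    simp [pvBaseTs, hb]
  · by_cases hbool : PySem.Chars.strip cs = "bool".toList
    · obtain ⟨h1, h2, h3⟩ := pvBaseNoWrap _ (Or.inr (Or.inl hbool))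
      rw [pvPeelStop _ _ h1 h2 h3]
      simp [pvBaseTs, hbool]
    · by_cases hstr : PySem.Chars.strip cs = "string".toList
      · obtain ⟨h1, h2, h3⟩ := pvBaseNoWrap _ (Or.inr (Or.inr hstr))
        rw [pvPeelStop _ _ h1 h2 h3]
        simp [pvBaseTs, hstr]
      · by_cases hopt : PySem.Chars.startswith (PySem.Chars.strip cs) "OPTIONAL(".toList
        · rw [pvPeel]
          rw [dif_pos hopt]
          have ih := pvMain (PySem.Chars.slice (PySem.Chars.strip cs) (some 9) (some (-1)))
              (stack ++ [PvWrap.opt])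
          rw [ih, ctypeGoA_strip]
          simp at hbool hstr hopt
          simp [hb, hbool, hstr, hopt, pvApplyWrap]
        · by_cases hlist : PySem.Chars.startswith (PySem.Chars.strip cs) "LIST(".toList
          · rw [pvPeel]
            rw [dif_neg (by simpa using hopt), dif_neg ?hreq, dif_pos hlist]
            case hreq =>
              -- "REQUIRED(" and "LIST(" prefixes are mutually exclusive
              intro hreq
              have hp1 : "LIST(".toList <+: PySem.Chars.strip cs :=
                (PySem.Chars.startswith_iff _ _).mp hlist
              have hp2 : "REQUIRED(".toList <+: PySem.Chars.strip cs :=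
                (PySem.Chars.startswith_iff _ _).mp hreq
              obtain ⟨u, hu⟩ := hp1
              obtain ⟨v, hv⟩ := hp2
              rw [← hu] at hv
              simp at hv
            have ih := pvMain (PySem.Chars.slice (PySem.Chars.strip cs) (some 5) (some (-1)))
                (stack ++ [PvWrap.lst])
            rw [ih]
            simp at hbool hstr hopt hlist
            simp [hb, hbool, hstr, hopt, hlist, pvApplyWrap]
            rw [ctypeGoA_strip]
          · by_cases hreq : PySem.Chars.startswith (PySem.Chars.strip cs) "REQUIRED(".toList
            · rw [pvPeel]
              rw [dif_neg (by simpa using hopt), dif_pos hreq]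
              have ih := pvMain (PySem.Chars.slice (PySem.Chars.strip cs) (some 9) (some (-1))) stack
              rw [ih, ctypeGoA_strip]
              simp at hbool hstr hopt hlist hreq
              simp [hb, hbool, hstr, hopt, hlist, hreq]
            · rw [pvPeelStop _ _ (by simpa using hopt) (by simpa using hreq) (by simpa using hlist)]
              simp at hbool hstr hopt hlist hreq
              simp [pvBaseTs, hb, hbool, hstr, hopt, hlist, hreq]
termination_by cs.length
decreasing_by
  all_goals first
  | exact pvSliceLtStrip cs "OPTIONAL(".toList 9 (by decide) hopt
  | exact pvSliceLtStrip cs "LIST(".toList 5 (by decide) hlist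
  | exact pvSliceLtStrip cs "REQUIRED(".toList 9 (by decide) hreq

-- ===== VERDICT (by name: the statement is the Claim_ definition above) =====
theorem c_type_to_ts_spec : Claim_equal_c_type_to_ts := by
  intro c _
  unfold Spec_c_type_to_ts c_type_to_ts c_type_to_ts_alt
  have h := pvMain c.toList []
  simp only [List.reverse_nil, List.foldl_nil] at h
  exact congrArg String.ofList h.symm
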